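-- pv_equiv track=rewrite | github.com/DrevalisCS/creator-studio | src/shortsfactory/services/music/_monolith.py | _extract_audio_output
-- ===== SOURCE A (Python) =====
-- def _extract_audio_output(outputs: dict) -> dict | None:
--     """Find the first audio file entry in a ComfyUI history outputs dict.
--
--     ComfyUI nodes report outputs under varying keys (``audio``,
--     ``audios``, ``files``, ``gifs``).  This helper checks all known
--     keys and returns the first dict that has a ``filename`` ending in
--     a recognised audio extension.
--
--     Args:
--         outputs: The ``outputs`` dict from ``ComfyUIClient.get_history()``.
--
--     Returns:
--         A dict with at minimum a ``"filename"`` key, or ``None``.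
--     """
--     audio_extensions = {".mp3", ".wav", ".ogg", ".flac"}
--     candidate: dict | None = None
--
--     for _node_id, node_output in outputs.items():
--         for key in ("audio", "audios", "files", "gifs", "images", "videos"):
--             items = node_output.get(key, [])
--             if not isinstance(items, list) or not items:
--                 continue
--             for item in items:
--                 if not isinstance(item, dict) or "filename" not in item:
--                     continue
--                 fname = item["filename"].lower()
--                 if any(fname.endswith(ext) for ext in audio_extensions):
--                     return item
--                 # Keep as fallback if no audio-extension match found yet.
--                 if candidate is None:
--                     candidate = item
--
--     return candidate
-- ===== SOURCE B (Python) =====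
-- def _extract_audio_output(outputs: dict) -> dict | None:
--     """Two-pass rewrite: scan once for the first audio-extension entry,
--     else rescan for the first filename-bearing entry (the fallback)."""
--     keys = ("audio", "audios", "files", "gifs", "images", "videos")
--
--     def _entries():
--         for _node_id, node_output in outputs.items():
--             for key in keys:
--                 items = node_output.get(key, [])
--                 if not isinstance(items, list) or not items:
--                     continue
--                 for item in items:
--                     if isinstance(item, dict) and "filename" in item:
--                         yield item
--
--     hit = next(
--         (it for it in _entries()
--          if it["filename"].lower().endswith((".mp3", ".wav", ".ogg", ".flac"))),
--         None,
--     )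
--     if hit is not None:
--         return hit
--     return next(_entries(), None)
-- ===== Notes on version B (the rewrite author's own statement) =====
-- stated objective: simpler
-- what changed: Replaced A's single nested pass with a candidate accumulator and early return by two next() scans over a flattened generator of filename-bearing entries: first for an audio-extension match, else the first entry as fallback.
import Mathlib
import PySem

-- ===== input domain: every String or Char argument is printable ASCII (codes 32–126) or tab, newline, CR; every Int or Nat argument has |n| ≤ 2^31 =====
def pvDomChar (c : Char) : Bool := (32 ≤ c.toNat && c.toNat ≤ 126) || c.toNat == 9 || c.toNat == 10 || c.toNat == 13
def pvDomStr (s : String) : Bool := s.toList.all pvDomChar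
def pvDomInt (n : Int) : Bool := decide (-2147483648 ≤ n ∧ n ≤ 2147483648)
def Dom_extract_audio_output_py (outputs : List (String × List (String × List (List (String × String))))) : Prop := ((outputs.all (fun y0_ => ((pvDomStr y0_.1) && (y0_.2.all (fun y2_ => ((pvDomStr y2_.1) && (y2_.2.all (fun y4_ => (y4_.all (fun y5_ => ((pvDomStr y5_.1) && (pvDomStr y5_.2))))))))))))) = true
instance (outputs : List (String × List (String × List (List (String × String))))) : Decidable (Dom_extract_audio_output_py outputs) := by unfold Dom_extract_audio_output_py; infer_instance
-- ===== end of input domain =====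

-- B is a two-pass rewrite (first audio match, else first filename entry) replacing A's
-- single pass with a candidate accumulator; objective: simpler, same cost.

-- shared with both Pythons: the key tuple and the two item tests
def pvKeys : List String := ["audio", "audios", "files", "gifs", "images", "videos"]

-- '"filename" in item'
def pvHasFn (it : List (String × String)) : Bool := (PySem.Dict.mk it).contains "filename"

-- 'item["filename"].lower()' ends with one of the four audio extensions
def pvIsAudio (it : List (String × String)) : Bool :=
  let fname := PySem.Str.lower ((PySem.Dict.mk it).getD "filename" "")
  [".mp3", ".wav", ".ogg", ".flac"].any (fun e => PySem.Str.endswith fname e)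

-- ===== PORT A =====
-- inner 'for item in items' loop; .error = early 'return item', .ok = updated candidate
def pvAItems : List (List (String × String)) → Option (List (String × String)) →
    Except (List (String × String)) (Option (List (String × String)))
  | [], cand => .ok cand
  | it :: rest, cand =>
    if pvHasFn it then
      if pvIsAudio it then .error it
      else pvAItems rest (if cand.isNone then some it else cand)
    else pvAItems rest cand

-- 'for key in (…)' loop (the isinstance(items, list) guard is trivially true under the types)
def pvAKeys : List String → List (String × List (List (String × String))) →
    Option (List (String × String)) →
    Except (List (String × String)) (Option (List (String × String)))
  | [], _, cand => .ok cand
  | k :: ks, no, cand =>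
    let items := (PySem.Dict.mk no).getD k []
    if items = [] then pvAKeys ks no cand
    else
      match pvAItems items cand with
      | .error r => .error r
      | .ok cand' => pvAKeys ks no cand'

-- 'for _node_id, node_output in outputs.items()' loop
def pvANodes : List (String × List (String × List (List (String × String)))) →
    Option (List (String × String)) →
    Except (List (String × String)) (Option (List (String × String)))
  | [], cand => .ok cand
  | (_, no) :: rest, cand =>
    match pvAKeys pvKeys no cand with
    | .error r => .error r
    | .ok cand' => pvANodes rest cand'

def extract_audio_output_py (outputs : List (String × List (String × List (List (String × String))))) : Option (List (String × String)) :=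
  match pvANodes outputs none with
  | .error r => some r
  | .ok cand => cand

-- ===== PORT B =====
-- the generator _entries(): every filename-bearing item in traversal order
def pvBEntries (outputs : List (String × List (String × List (List (String × String))))) :
    List (List (String × String)) :=
  outputs.flatMap (fun p =>
    pvKeys.flatMap (fun k =>
      let items := (PySem.Dict.mk p.2).getD k []
      if items = [] then [] else items.filter pvHasFn))

def extract_audio_output_py_alt (outputs : List (String × List (String × List (List (String × String))))) : Option (List (String × String)) :=
  match (pvBEntries outputs).find? pvIsAudio with
  | some hit => some hit
  | none => (pvBEntries outputs).head?

-- ===== PRECONDITION & SPEC =====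
def Spec_extract_audio_output_py (outputs : List (String × List (String × List (List (String × String))))) (out : Option (List (String × String))) : Prop := out = extract_audio_output_py_alt outputs
instance (outputs : List (String × List (String × List (List (String × String))))) (out : Option (List (String × String))) : Decidable (Spec_extract_audio_output_py outputs out) := by unfold Spec_extract_audio_output_py; infer_instance

-- ===== CLAIM (what is proved, stated in full; the proofs are below) =====
def Claim_equal_extract_audio_output_py : Prop := ∀ (outputs : List (String × List (String × List (List (String × String))))), Dom_extract_audio_output_py outputs → Spec_extract_audio_output_py outputs (extract_audio_output_py outputs)

-- ===== LEMMAS AND PROOFS =====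

-- the common denotation of one pass over a list of filename-bearing entries
def pvRun (es : List (List (String × String))) (cand : Option (List (String × String))) :
    Except (List (String × String)) (Option (List (String × String))) :=
  match es.find? pvIsAudio with
  | some r => .error r
  | none => .ok (cand.or es.head?)

lemma pvRun_nil (cand : Option (List (String × String))) : pvRun [] cand = .ok cand := by
  simp [pvRun]

lemma pvRun_append (es₁ es₂ : List (List (String × String)))
    (cand : Option (List (String × String))) :
    pvRun (es₁ ++ es₂) cand =
      match pvRun es₁ cand with
      | .error r => .error r
      | .ok c => pvRun es₂ c := by
  simp only [pvRun, List.find?_append, List.head?_append]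
  cases h₁ : es₁.find? pvIsAudio with
  | some r => simp
  | none =>
    cases es₁ with
    | nil => simp
    | cons e es => cases cand <;> simp

lemma pvAItems_eq (items : List (List (String × String)))
    (cand : Option (List (String × String))) :
    pvAItems items cand = pvRun (items.filter pvHasFn) cand := by
  induction items generalizing cand with
  | nil => simp [pvAItems, pvRun]
  | cons it rest ih =>
    by_cases hfn : pvHasFn it
    · by_cases haud : pvIsAudio it
      · simp [pvAItems, hfn, haud, pvRun]
      · rw [show pvAItems (it :: rest) cand
              = pvAItems rest (if cand.isNone then some it else cand) by
            simp [pvAItems, hfn, haud]]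
        rw [ih]
        simp only [pvRun, List.filter_cons, hfn, if_pos trivial, List.find?_cons, haud]
        cases h : (rest.filter pvHasFn).find? pvIsAudio with
        | some r => simp
        | none => cases cand <;> simp 
    · have hf : List.filter pvHasFn (it :: rest) = List.filter pvHasFn rest := by
        simp [hfn]
      rw [show pvAItems (it :: rest) cand = pvAItems rest cand by simp [pvAItems, hfn], hf]
      exact ih cand

lemma pvAKeys_eq (ks : List String) (no : List (String × List (List (String × String))))
    (cand : Option (List (String × String))) :
    pvAKeys ks no cand =
      pvRun (ks.flatMap (fun k =>
        let items := (PySem.Dict.mk no).getD k []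
        if items = [] then [] else items.filter pvHasFn)) cand := by
  induction ks generalizing cand with
  | nil => simp [pvAKeys, pvRun]
  | cons k ks ih =>
    rw [List.flatMap_cons, pvRun_append]
    by_cases hemp : (PySem.Dict.mk no).getD k [] = []
    · simp only [pvAKeys, hemp, if_pos trivial, pvRun_nil]
      exact ih cand
    · rw [show pvAKeys (k :: ks) no cand
            = (match pvAItems ((PySem.Dict.mk no).getD k []) cand with
               | .error r => .error r
               | .ok c => pvAKeys ks no c) by simp [pvAKeys, hemp]]
      rw [pvAItems_eq, if_neg hemp]
      cases h : pvRun (List.filter pvHasFn ((PySem.Dict.mk no).getD k [])) cand with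
      | error r => simp
      | ok c => simp [ih]

lemma pvANodes_eq (ns : List (String × List (String × List (List (String × String)))))
    (cand : Option (List (String × String))) :
    pvANodes ns cand = pvRun (pvBEntries ns) cand := by
  induction ns generalizing cand with
  | nil => simp [pvANodes, pvBEntries, pvRun]
  | cons p rest ih =>
    obtain ⟨nid, no⟩ := p
    rw [show pvBEntries ((nid, no) :: rest)
          = (pvKeys.flatMap (fun k =>
              let items := (PySem.Dict.mk no).getD k []
              if items = [] then [] else items.filter pvHasFn)) ++ pvBEntries rest by
        simp [pvBEntries]]
    rw [pvRun_append, ← pvAKeys_eq]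
    cases h : pvAKeys pvKeys no cand with
    | error r => simp [pvANodes, h]
    | ok c => simp [pvANodes, h, ih]

-- ===== VERDICT (by name: the statement is the Claim_ definition above) =====
theorem extract_audio_output_py_spec : Claim_equal_extract_audio_output_py := by
  intro outputs _
  unfold Spec_extract_audio_output_py extract_audio_output_py extract_audio_output_py_alt
  rw [pvANodes_eq]
  simp only [pvRun]
  cases h : (pvBEntries outputs).find? pvIsAudio with
  | some r => simp
  | none => simp
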